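-- pv_equiv track=rewrite | github.com/sjovy/t_bigFiveAspectScale | exportedResearch/bfas_scoring.py | calculate_aspect_raw_score
-- ===== SOURCE A (Python) =====
-- from typing import List, Dict, Optional
--
-- REVERSE_ITEMS = {
--     'openness': [9, 10],
--     'intellect': [19, 20],
--     'industriousness': [29, 30],
--     'orderliness': [39, 40],
--     'enthusiasm': [49, 50],
--     'assertiveness': [59, 60],
--     'compassion': [69, 70],
--     'politeness': [79, 80],
--     'withdrawal': [89, 90],
--     'volatility': [99, 100]
-- }
--
-- ASPECT_RANGES = {
--     'openness': (1, 10),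
--     'intellect': (11, 20),
--     'industriousness': (21, 30),
--     'orderliness': (31, 40),
--     'enthusiasm': (41, 50),
--     'assertiveness': (51, 60),
--     'compassion': (61, 70),
--     'politeness': (71, 80),
--     'withdrawal': (81, 90),
--     'volatility': (91, 100)
-- }
--
-- def reverse_code(response: int) -> int:
--     """Apply reverse coding formula: 6 - response."""
--     return 6 - response
--
-- def calculate_aspect_raw_score(responses: List[int], aspect: str) -> int:
--     """Calculate raw score for a single aspect (10 items)."""
--     start, end = ASPECT_RANGES[aspect]
--     aspect_responses = responses[start-1:end]  # Convert to 0-indexed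
--
--     # Apply reverse coding to last 2 items
--     reverse_items = REVERSE_ITEMS[aspect]
--     score = 0
--
--     for i, response in enumerate(aspect_responses, start=start):
--         if i in reverse_items:
--             score += reverse_code(response)
--         else:
--             score += response
--
--     return score
-- ===== SOURCE B (Python) =====
-- REVERSE_ITEMS = {
--     'openness': [9, 10],
--     'intellect': [19, 20],
--     'industriousness': [29, 30],
--     'orderliness': [39, 40],
--     'enthusiasm': [49, 50],
--     'assertiveness': [59, 60],
--     'compassion': [69, 70],
--     'politeness': [79, 80],
--     'withdrawal': [89, 90],
--     'volatility': [99, 100]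
-- }
--
-- ASPECT_RANGES = {
--     'openness': (1, 10),
--     'intellect': (11, 20),
--     'industriousness': (21, 30),
--     'orderliness': (31, 40),
--     'enthusiasm': (41, 50),
--     'assertiveness': (51, 60),
--     'compassion': (61, 70),
--     'politeness': (71, 80),
--     'withdrawal': (81, 90),
--     'volatility': (91, 100)
-- }
--
--
-- def calculate_aspect_raw_score(responses, aspect):
--     """Base sum of the aspect slice, then a targeted reverse-coding correction."""
--     start, end = ASPECT_RANGES[aspect]
--     xs = responses[start - 1:end]
--     total = sum(xs)
--     for i in REVERSE_ITEMS[aspect]: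
--         idx = i - start
--         if 0 <= idx < len(xs):
--             total += 6 - 2 * xs[idx]
--     return total
-- ===== Notes on version B (the rewrite author's own statement) =====
-- stated objective: alternative
-- what changed: B replaces A's per-item enumerate loop with a membership branch by a single sum() of the slice plus a targeted correction pass over the two reverse-coded indices (adding 6-2r per in-bounds reverse item).
import Mathlib
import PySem

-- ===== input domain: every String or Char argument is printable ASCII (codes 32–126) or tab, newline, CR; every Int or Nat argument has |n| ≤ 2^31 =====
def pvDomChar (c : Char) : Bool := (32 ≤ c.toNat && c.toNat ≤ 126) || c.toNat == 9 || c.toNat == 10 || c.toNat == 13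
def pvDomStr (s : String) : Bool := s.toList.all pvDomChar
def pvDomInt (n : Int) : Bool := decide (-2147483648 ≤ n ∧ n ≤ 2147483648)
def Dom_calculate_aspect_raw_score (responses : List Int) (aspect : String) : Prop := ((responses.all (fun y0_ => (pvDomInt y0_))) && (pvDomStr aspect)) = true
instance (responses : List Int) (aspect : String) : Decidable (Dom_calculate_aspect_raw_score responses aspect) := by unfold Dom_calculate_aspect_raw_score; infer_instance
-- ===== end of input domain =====

-- B changes the decomposition: base sum of the slice plus a targeted reverse-item correction,
-- instead of A's per-item membership-branch loop; same cost, no speed claim.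

-- shared module constants (REVERSE_ITEMS / ASPECT_RANGES)
def pvReverseItems : PySem.Dict String (List Int) := PySem.Dict.ofList
  [("openness", [9, 10]), ("intellect", [19, 20]), ("industriousness", [29, 30]),
   ("orderliness", [39, 40]), ("enthusiasm", [49, 50]), ("assertiveness", [59, 60]),
   ("compassion", [69, 70]), ("politeness", [79, 80]), ("withdrawal", [89, 90]),
   ("volatility", [99, 100])]

def pvAspectRanges : PySem.Dict String (Int × Int) := PySem.Dict.ofList
  [("openness", (1, 10)), ("intellect", (11, 20)), ("industriousness", (21, 30)),
   ("orderliness", (31, 40)), ("enthusiasm", (41, 50)), ("assertiveness", (51, 60)),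
   ("compassion", (61, 70)), ("politeness", (71, 80)), ("withdrawal", (81, 90)),
   ("volatility", (91, 100))]

-- ===== PORT A =====
def reverse_code (response : Int) : Int := 6 - response

def calculate_aspect_raw_score (responses : List Int) (aspect : String) : Int :=
  match pvAspectRanges.get? aspect with
  | none => 0  -- KeyError in Python; excluded by Pre_
  | some (start, stop) =>
    let aspect_responses := PySem.List.slice responses (some (start - 1)) (some stop)
    match pvReverseItems.get? aspect with
    | none => 0  -- KeyError in Python; excluded by Pre_
    | some reverse_items =>
      (PySem.List.enumerate aspect_responses start).foldl
        (fun score p => if p.1 ∈ reverse_items then score + reverse_code p.2 else score + p.2) 0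

-- ===== PORT B =====
def calculate_aspect_raw_score_alt (responses : List Int) (aspect : String) : Int :=
  match pvAspectRanges.get? aspect with
  | none => 0  -- KeyError in Python; excluded by Pre_
  | some (start, stop) =>
    let xs := PySem.List.slice responses (some (start - 1)) (some stop)
    match pvReverseItems.get? aspect with
    | none => 0  -- KeyError in Python; excluded by Pre_
    | some rev =>
      rev.foldl
        (fun total i =>
          if 0 ≤ i - start ∧ i - start < (xs.length : Int)
          then total + (6 - 2 * xs.getD (i - start).toNat 0) else total)
        xs.sum

-- ===== PRECONDITION & SPEC =====
-- Pre_ excludes exactly the aspects not in the dictionaries, where Python A raises KeyError.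
def Pre_calculate_aspect_raw_score (responses : List Int) (aspect : String) : Prop :=
  aspect = "openness" ∨ aspect = "intellect" ∨ aspect = "industriousness" ∨
  aspect = "orderliness" ∨ aspect = "enthusiasm" ∨ aspect = "assertiveness" ∨
  aspect = "compassion" ∨ aspect = "politeness" ∨ aspect = "withdrawal" ∨
  aspect = "volatility"
instance (responses : List Int) (aspect : String) : Decidable (Pre_calculate_aspect_raw_score responses aspect) := by unfold Pre_calculate_aspect_raw_score; infer_instance

def pvWitness_calculate_aspect_raw_score : List Int × String :=
  ([1, 2, 3, 4, 5, 1, 2, 3, 4, 5], "openness")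

def Spec_calculate_aspect_raw_score (responses : List Int) (aspect : String) (out : Int) : Prop := out = calculate_aspect_raw_score_alt responses aspect
instance (responses : List Int) (aspect : String) (out : Int) : Decidable (Spec_calculate_aspect_raw_score responses aspect out) := by unfold Spec_calculate_aspect_raw_score; infer_instance

-- ===== CLAIM (what is proved, stated in full; the proofs are below) =====
def Claim_equal_calculate_aspect_raw_score : Prop := ∀ (responses : List Int) (aspect : String), Dom_calculate_aspect_raw_score responses aspect → Pre_calculate_aspect_raw_score responses aspect → Spec_calculate_aspect_raw_score responses aspect (calculate_aspect_raw_score responses aspect)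

-- ===== LEMMAS AND PROOFS =====

-- the correction B adds for reverse item i relative to slice xs starting at absolute index s
def pvCorr (xs : List Int) (s i : Int) : Int :=
  if 0 ≤ i - s ∧ i - s < (xs.length : Int) then 6 - 2 * xs.getD (i - s).toNat 0 else 0

lemma pvCorr_nil (s i : Int) : pvCorr [] s i = 0 := by
  unfold pvCorr
  rw [if_neg (by simp only [List.length_nil, Nat.cast_zero]; omega)]

lemma pvCorr_cons (y : Int) (ys : List Int) (s i : Int) :
    pvCorr (y :: ys) s i = (if i = s then 6 - 2 * y else 0) + pvCorr ys (s + 1) i := by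
  by_cases h : i = s
  · subst h
    have hL : pvCorr (y :: ys) i i = 6 - 2 * y := by
      unfold pvCorr
      rw [if_pos (by simp only [sub_self, List.length_cons]; constructor <;> omega)]
      simp
    have hR : pvCorr ys (i + 1) i = 0 := by
      unfold pvCorr
      rw [if_neg (by omega)]
    rw [hL, hR, if_pos rfl]
    ring
  · rw [if_neg h, zero_add]
    unfold pvCorr
    by_cases h2 : 0 ≤ i - (s + 1) ∧ i - (s + 1) < (ys.length : Int)
    · rw [if_pos (by simp only [List.length_cons]; push_cast; omega), if_pos h2]
      have hn : (i - s).toNat = (i - (s + 1)).toNat + 1 := by omega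
      rw [hn]
      simp [List.getD]
    · rw [if_neg (by simp only [List.length_cons]; push_cast; omega), if_neg h2]

lemma pv_sum_map_add (f g : Int → Int) : ∀ (R : List Int),
    (R.map (fun i => f i + g i)).sum = (R.map f).sum + (R.map g).sum := by
  intro R
  induction R with
  | nil => simp
  | cons a R ih => simp only [List.map_cons, List.sum_cons, ih]; ring

lemma pv_sum_ite (s c : Int) : ∀ (R : List Int), R.Nodup →
    (R.map (fun i => if i = s then c else 0)).sum = if s ∈ R then c else 0 := by
  intro R
  induction R with
  | nil => simp
  | cons a R ih =>
    intro hR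
    rcases List.nodup_cons.mp hR with ⟨ha, hR'⟩
    simp only [List.map_cons, List.sum_cons, ih hR', List.mem_cons]
    by_cases h : a = s
    · subst h
      rw [if_pos rfl, if_neg ha, if_pos (Or.inl rfl)]
      ring
    · rw [if_neg h]
      by_cases hs : s ∈ R
      · rw [if_pos hs, if_pos (Or.inr hs)]
        ring
      · rw [if_neg hs, if_neg (by
          intro hc
          rcases hc with hc | hc
          · exact h hc.symm
          · exact hs hc)]
        ring

lemma pv_key (R : List Int) (hR : R.Nodup) :
    ∀ (xs : List Int) (s : Int),
      ((PySem.List.enumerate xs s).map (fun p => if p.1 ∈ R then 6 - p.2 else p.2)).sum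
        = xs.sum + (R.map (pvCorr xs s)).sum := by
  intro xs
  induction xs with
  | nil =>
    intro s
    have h : R.map (pvCorr [] s) = R.map (fun _ => (0 : Int)) :=
      List.map_congr_left (fun i _ => pvCorr_nil s i)
    simp [PySem.List.enumerate_nil, h]
  | cons y ys ih =>
    intro s
    have hmap : R.map (pvCorr (y :: ys) s)
        = R.map (fun i => (if i = s then 6 - 2 * y else 0) + pvCorr ys (s + 1) i) :=
      List.map_congr_left (fun i _ => pvCorr_cons y ys s i)
    rw [PySem.List.enumerate_cons, List.map_cons, List.sum_cons, ih (s + 1), hmap,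
      pv_sum_map_add, pv_sum_ite s (6 - 2 * y) R hR, List.sum_cons]
    by_cases h : s ∈ R <;> simp only [h, if_true, if_false] <;> ring

lemma pv_bridge (R : List Int) (hR : R.Nodup) (xs : List Int) (s : Int) :
    (PySem.List.enumerate xs s).foldl
        (fun score p => if p.1 ∈ R then score + reverse_code p.2 else score + p.2) 0
      = R.foldl
          (fun total i =>
            if 0 ≤ i - s ∧ i - s < (xs.length : Int)
            then total + (6 - 2 * xs.getD (i - s).toNat 0) else total)
          xs.sum := by
  have hA : (PySem.List.enumerate xs s).foldl
      (fun score p => if p.1 ∈ R then score + reverse_code p.2 else score + p.2) 0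
      = (PySem.List.enumerate xs s).foldl
        (fun score p => score + (if p.1 ∈ R then 6 - p.2 else p.2)) 0 :=
    PySem.List.foldl_congr_mem _ _ _ _ (by
      intro acc p _
      unfold reverse_code
      split_ifs <;> ring)
  have hB : R.foldl
      (fun total i =>
        if 0 ≤ i - s ∧ i - s < (xs.length : Int)
        then total + (6 - 2 * xs.getD (i - s).toNat 0) else total)
      xs.sum
      = R.foldl (fun total i => total + pvCorr xs s i) xs.sum :=
    PySem.List.foldl_congr_mem _ _ _ _ (by
      intro acc i _
      unfold pvCorr
      split_ifs <;> ring)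
  rw [hA, hB, PySem.List.foldl_add, PySem.List.foldl_add, pv_key R hR xs s]
  simp

-- ===== VERDICT (by name: the statement is the Claim_ definition above) =====
theorem calculate_aspect_raw_score_spec : Claim_equal_calculate_aspect_raw_score := by
  intro responses aspect _ hpre
  unfold Spec_calculate_aspect_raw_score
  rcases hpre with h | h | h | h | h | h | h | h | h | h <;> subst h <;>
    simp only [calculate_aspect_raw_score, calculate_aspect_raw_score_alt,
      pvAspectRanges, pvReverseItems] <;>
    exact pv_bridge _ (by decide) _ _
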